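-- pv_equiv track=rewrite | github.com/doraolej/TriggerStudy | Helper/Binning.py | findCR1BinIndex
-- ===== SOURCE A (Python) =====
-- CT_bin = [300, 400, -1]
--
-- MT_bin = [0, 60, 95, -1]
--
-- def findCR1BinIndex(CT, MT, LepChrg):
--     idx = -1
--     pickIdx = -1
--     for j in range(len(MT_bin)-1):
--         cut1 = MT>MT_bin[j] if j == len(MT_bin)-2 else MT>MT_bin[j] and MT<=MT_bin[j+1]
--         cutchrg = LepChrg==-1 if j != len(MT_bin)-2 else True
--         for i in range(len(CT_bin)-1):
--             cut2 = CT>CT_bin[i] if i == len(CT_bin)-2 else CT>CT_bin[i] and CT<=CT_bin[i+1]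
--             idx += 1
--             if (cut1 and cut2 and LepChrg):
--                 pickIdx = idx
--                 break
--         else:
--             continue
--         break
--
--     return pickIdx
-- ===== SOURCE B (Python) =====
-- def findCR1BinIndex(CT, MT, LepChrg):
--     if not LepChrg:
--         return -1
--     if 0 < MT <= 60:
--         mt = 0
--     elif 60 < MT <= 95:
--         mt = 1
--     elif MT > 95:
--         mt = 2
--     else:
--         return -1
--     if 300 < CT <= 400:
--         ct = 0
--     elif CT > 400:
--         ct = 1
--     else:
--         return -1
--     return 2 * mt + ct
-- ===== Notes on version B (the rewrite author's own statement) =====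
-- stated objective: simpler
-- what changed: Replaces the nested for-loops with running idx counter and for/else/break by two independent interval classifications (MT bin, CT bin) combined with the closed form 2*mt+ct, keeping LepChrg as a bare truthiness gate and -1 as the no-match sentinel.
import Mathlib
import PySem

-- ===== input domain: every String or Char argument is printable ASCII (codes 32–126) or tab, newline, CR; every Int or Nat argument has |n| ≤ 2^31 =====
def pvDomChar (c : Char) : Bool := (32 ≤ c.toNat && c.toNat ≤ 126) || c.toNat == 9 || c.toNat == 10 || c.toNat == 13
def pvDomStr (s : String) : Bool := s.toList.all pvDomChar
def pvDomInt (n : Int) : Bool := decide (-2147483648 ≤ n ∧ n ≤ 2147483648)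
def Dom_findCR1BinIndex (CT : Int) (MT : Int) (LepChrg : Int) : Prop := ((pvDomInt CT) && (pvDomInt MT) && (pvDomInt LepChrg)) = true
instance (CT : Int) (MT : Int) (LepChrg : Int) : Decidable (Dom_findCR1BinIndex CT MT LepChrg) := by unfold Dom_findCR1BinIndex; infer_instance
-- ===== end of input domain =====

-- B replaces A's nested loops/idx counter/for-else-break by two independent interval
-- classifications combined as 2*mt+ct (objective: simpler).

-- ===== PORT A =====
def CT_binA : List Int := [300, 400, -1]
def MT_binA : List Int := [0, 60, 95, -1]

-- inner 'for i in range(len(CT_bin)-1)' loop; returns (idx, some pickIdx) on break, (idx, none) if it runs out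
def pvInnerA (CT : Int) (LepChrg : Int) (cut1 : Bool) (idx : Int) : List Int → Int × Option Int
  | [] => (idx, none)
  | i :: rest =>
    let cut2 : Bool :=
      if i = (CT_binA.length : Int) - 2 then decide (CT > PySem.List.pyGetD CT_binA i 0)
      else decide (CT > PySem.List.pyGetD CT_binA i 0) && decide (CT ≤ PySem.List.pyGetD CT_binA (i + 1) 0)
    let idx' := idx + 1
    if cut1 && cut2 && decide (LepChrg ≠ 0) then (idx', some idx')
    else pvInnerA CT LepChrg cut1 idx' rest

-- outer 'for j in range(len(MT_bin)-1)' loop with for/else/break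
def pvOuterA (CT : Int) (MT : Int) (LepChrg : Int) (idx pickIdx : Int) : List Int → Int
  | [] => pickIdx
  | j :: rest =>
    let cut1 : Bool :=
      if j = (MT_binA.length : Int) - 2 then decide (MT > PySem.List.pyGetD MT_binA j 0)
      else decide (MT > PySem.List.pyGetD MT_binA j 0) && decide (MT ≤ PySem.List.pyGetD MT_binA (j + 1) 0)
    let _cutchrg : Bool :=   -- computed by A but never used
      if j ≠ (MT_binA.length : Int) - 2 then decide (LepChrg = -1) else true
    match pvInnerA CT LepChrg cut1 idx (PySem.List.pyRange 0 ((CT_binA.length : Int) - 1) 1) with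
    | (_, some p) => p                    -- inner break → outer break, return pickIdx
    | (idx', none) => pvOuterA CT MT LepChrg idx' pickIdx rest   -- for/else: continue

def findCR1BinIndex (CT : Int) (MT : Int) (LepChrg : Int) : Int :=
  pvOuterA CT MT LepChrg (-1) (-1) (PySem.List.pyRange 0 ((MT_binA.length : Int) - 1) 1)

-- ===== PORT B =====
def pvCombineB (CT : Int) (mt : Int) : Int :=
  if 300 < CT ∧ CT ≤ 400 then 2 * mt + 0
  else if CT > 400 then 2 * mt + 1
  else -1

def findCR1BinIndex_alt (CT : Int) (MT : Int) (LepChrg : Int) : Int :=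
  if LepChrg = 0 then -1
  else
    if 0 < MT ∧ MT ≤ 60 then
      pvCombineB CT 0
    else if 60 < MT ∧ MT ≤ 95 then
      pvCombineB CT 1
    else if MT > 95 then
      pvCombineB CT 2
    else -1

-- ===== PRECONDITION & SPEC =====
def Spec_findCR1BinIndex (CT : Int) (MT : Int) (LepChrg : Int) (out : Int) : Prop := out = findCR1BinIndex_alt CT MT LepChrg
instance (CT : Int) (MT : Int) (LepChrg : Int) (out : Int) : Decidable (Spec_findCR1BinIndex CT MT LepChrg out) := by unfold Spec_findCR1BinIndex; infer_instance

-- ===== CLAIM (what is proved, stated in full; the proofs are below) =====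
def Claim_equal_findCR1BinIndex : Prop := ∀ (CT : Int) (MT : Int) (LepChrg : Int), Dom_findCR1BinIndex CT MT LepChrg → Spec_findCR1BinIndex CT MT LepChrg (findCR1BinIndex CT MT LepChrg)

-- ===== LEMMAS AND PROOFS =====

-- ===== VERDICT (by name: the statement is the Claim_ definition above) =====
set_option maxHeartbeats 2000000 in
theorem findCR1BinIndex_spec : Claim_equal_findCR1BinIndex := by
  intro CT MT LepChrg _
  have hr3 : PySem.List.pyRange 0 ((MT_binA.length : Int) - 1) 1 = [0, 1, 2] := by decide
  have hr2 : PySem.List.pyRange 0 ((CT_binA.length : Int) - 1) 1 = [0, 1] := by decide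
  unfold Spec_findCR1BinIndex findCR1BinIndex findCR1BinIndex_alt
  rw [hr3]
  simp only [pvOuterA, hr2]
  norm_num [pvInnerA, pvCombineB, CT_binA, MT_binA,
        PySem.List.pyGetD, PySem.List.pyGet?, PySem.List.pyIdx?]
  split_ifs <;> simp_all
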